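-- pv_equiv track=rewrite | github.com/dgbarrett/jumbles | JumbleAnswerTemplate.py | getMaxDifIndex
-- ===== SOURCE A (Python) =====
-- def getMaxDifIndex(sizes):
-- 	maxdif = 0;
-- 	currval = sizes[0]
-- 	index = 0;
--
-- 	for i,size in enumerate(sizes[1:]):
-- 		dif = size - currval
--
-- 		if dif > maxdif:
-- 			index = i
-- 			maxdif = dif
--
-- 		currval = size
--
-- 	return index
-- ===== SOURCE B (Python) =====
-- def getMaxDifIndex(sizes):
--     diffs = [b - a for a, b in zip(sizes, sizes[1:])]
--     best = max(diffs, default=0)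
--     return diffs.index(best) if best > 0 else 0
-- ===== Notes on version B (the rewrite author's own statement) =====
-- stated objective: simpler
-- what changed: replaces A's single running-maximum loop with mutable (maxdif, currval, index) state by a materialized consecutive-differences table followed by separate max and first-index scans
import Mathlib
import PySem

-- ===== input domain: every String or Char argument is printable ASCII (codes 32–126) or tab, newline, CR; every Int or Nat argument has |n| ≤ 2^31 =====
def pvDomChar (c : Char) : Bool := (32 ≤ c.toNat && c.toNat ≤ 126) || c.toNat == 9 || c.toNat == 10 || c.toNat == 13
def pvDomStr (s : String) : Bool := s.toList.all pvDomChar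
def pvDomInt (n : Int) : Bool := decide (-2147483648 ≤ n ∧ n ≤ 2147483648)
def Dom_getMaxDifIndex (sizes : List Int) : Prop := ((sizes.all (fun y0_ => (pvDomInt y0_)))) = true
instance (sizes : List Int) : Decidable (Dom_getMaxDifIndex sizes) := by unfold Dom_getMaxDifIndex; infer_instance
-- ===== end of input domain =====

-- B replaces A's running-maximum loop by a differences table with separate max and
-- first-index scans (objective: simpler); on the empty list A raises IndexError, B returns 0.

-- ===== PORT A =====
def getMaxDifIndex (sizes : List Int) : Int :=
  match PySem.List.pyGet? sizes 0 with
  | none => 0      -- Python raises IndexError here; excluded by Pre_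
  | some c0 =>
    let st := (PySem.List.enumerate (PySem.List.slice sizes (some 1) none)).foldl
      (fun (st : Int × Int × Int) (p : Int × Int) =>
        let dif := p.2 - st.2.1
        if dif > st.1 then (dif, p.2, p.1) else (st.1, p.2, st.2.2))
      (0, c0, 0)
    st.2.2

-- ===== PORT B =====
def getMaxDifIndex_alt (sizes : List Int) : Int :=
  let diffs := (sizes.zip (PySem.List.slice sizes (some 1) none)).map (fun p => p.2 - p.1)
  let best := (PySem.List.max? diffs (fun y => y)).getD 0
  if best > 0 then (((PySem.List.index? diffs best).getD 0 : Nat) : Int) else 0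

-- ===== PRECONDITION & SPEC =====
-- Pre_ excludes only the empty list, on which Python A raises IndexError.
def Pre_getMaxDifIndex (sizes : List Int) : Prop := sizes ≠ []
instance (sizes : List Int) : Decidable (Pre_getMaxDifIndex sizes) := by unfold Pre_getMaxDifIndex; infer_instance
def pvWitness_getMaxDifIndex : List Int := [3, 7, 6, 9]

def Spec_getMaxDifIndex (sizes : List Int) (out : Int) : Prop := out = getMaxDifIndex_alt sizes
instance (sizes : List Int) (out : Int) : Decidable (Spec_getMaxDifIndex sizes out) := by unfold Spec_getMaxDifIndex; infer_instance

-- ===== CLAIM (what is proved, stated in full; the proofs are below) =====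
def Claim_equal_getMaxDifIndex : Prop := ∀ (sizes : List Int), Dom_getMaxDifIndex sizes → Pre_getMaxDifIndex sizes → Spec_getMaxDifIndex sizes (getMaxDifIndex sizes)

-- ===== LEMMAS AND PROOFS =====

/-- The sequence of consecutive differences of `c :: s`. -/
def diffsOf (c : Int) : List Int → List Int
  | [] => []
  | x :: t => (x - c) :: diffsOf x t

/-- A's loop, restated as a recursion over the differences list. -/
def loopA (d : List Int) (k m idx : Int) : Int :=
  match d with
  | [] => idx
  | x :: t => if x > m then loopA t (k + 1) x k else loopA t (k + 1) m idx

theorem diffsOf_eq_zip (c : Int) (rest : List Int) :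
    ((c :: rest).zip rest).map (fun p => p.2 - p.1) = diffsOf c rest := by
  induction rest generalizing c with
  | nil => rfl
  | cons x t ih => simp [diffsOf, ih x]

theorem foldA_eq_loopA (s : List Int) (k m c idx : Int) :
    ((PySem.List.enumerate s k).foldl
      (fun (st : Int × Int × Int) (p : Int × Int) =>
        let dif := p.2 - st.2.1
        if dif > st.1 then (dif, p.2, p.1) else (st.1, p.2, st.2.2))
      (m, c, idx)).2.2 = loopA (diffsOf c s) k m idx := by
  induction s generalizing k m c idx with
  | nil => rfl
  | cons x t ih =>
    simp only [PySem.List.enumerate_cons, List.foldl_cons, diffsOf, loopA]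
    by_cases h : x - c > m
    · simp [h, ih]
    · simp [h, ih]

theorem foldl_max_assoc (t : List Int) (x y : Int) :
    t.foldl max (max x y) = max x (t.foldl max y) := by
  induction t generalizing y with
  | nil => rfl
  | cons z t ih => simp only [List.foldl_cons, max_assoc, ih]

theorem foldl_max_mem (t : List Int) (x : Int) :
    t.foldl max x = x ∨ t.foldl max x ∈ t := by
  induction t generalizing x with
  | nil => exact Or.inl rfl
  | cons z t ih =>
    simp only [List.foldl_cons]
    rcases ih (max x z) with h | h
    · rcases max_cases x z with ⟨he, _⟩ | ⟨he, _⟩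
      · exact Or.inl (by rw [h, he])
      · refine Or.inr ?_
        rw [h, he]
        exact List.mem_cons_self ..
    · exact Or.inr (List.mem_cons_of_mem _ h)

theorem mem_cons_foldl_max (t : List Int) (y : Int) :
    t.foldl max y ∈ y :: t := by
  rcases foldl_max_mem t y with h | h
  · rw [h]; exact List.mem_cons_self ..
  · exact List.mem_cons_of_mem _ h

theorem loopA_char (t : List Int) (x k m idx : Int) :
    loopA (x :: t) k m idx =
      if m < t.foldl max x then
        k + (((PySem.List.index? (x :: t) (t.foldl max x)).getD 0 : Nat) : Int)
      else idx := by
  induction t generalizing x k m idx with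
  | nil =>
    simp only [loopA, List.foldl_nil]
    by_cases h : x > m
    · rw [if_pos h, if_pos (by omega : m < x), PySem.List.index?_cons_self]
      simp
    · rw [if_neg h, if_neg (by omega : ¬ m < x)]
  | cons y t ih =>
    have hM : (y :: t).foldl max x = max x (t.foldl max y) := by
      simp only [List.foldl_cons]
      exact foldl_max_assoc t x y
    conv_lhs => rw [loopA]
    by_cases hx : x > m
    · rw [if_pos hx, ih]
      by_cases h2 : x < t.foldl max y
      · have hMv : (y :: t).foldl max x = t.foldl max y := hM.trans (max_eq_right h2.le)
        obtain ⟨j, hj⟩ := Option.isSome_iff_exists.mp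
          ((PySem.List.index?_isSome_iff _ _).2 (mem_cons_foldl_max t y))
        rw [if_pos h2, if_pos (by omega : m < (y :: t).foldl max x), hMv,
          PySem.List.index?_cons_of_ne _ (ne_of_lt h2), hj]
        simp
        omega
      · have hMv : (y :: t).foldl max x = x := hM.trans (max_eq_left (not_lt.1 h2))
        rw [if_neg h2, hMv, if_pos (by omega : m < x), PySem.List.index?_cons_self]
        simp
    · rw [if_neg hx, ih]
      by_cases h2 : m < t.foldl max y
      · have hx' : x < t.foldl max y := by omega
        have hMv : (y :: t).foldl max x = t.foldl max y := hM.trans (max_eq_right hx'.le)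
        obtain ⟨j, hj⟩ := Option.isSome_iff_exists.mp
          ((PySem.List.index?_isSome_iff _ _).2 (mem_cons_foldl_max t y))
        rw [if_pos h2, if_pos (by omega : m < (y :: t).foldl max x), hMv,
          PySem.List.index?_cons_of_ne _ (ne_of_lt hx'), hj]
        simp
        omega
      · have hle : ¬ m < (y :: t).foldl max x :=
          not_lt.2 (hM ▸ max_le (not_lt.1 hx) (not_lt.1 h2))
        rw [if_neg h2, if_neg hle]

-- ===== VERDICT (by name: the statement is the Claim_ definition above) =====
theorem getMaxDifIndex_spec : Claim_equal_getMaxDifIndex := by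
  unfold Claim_equal_getMaxDifIndex
  intro sizes _ hpre
  unfold Spec_getMaxDifIndex getMaxDifIndex getMaxDifIndex_alt
  match sizes with
  | [] => exact absurd rfl hpre
  | c0 :: rest =>
    simp only [PySem.List.pyGet?_zero_cons, PySem.List.slice_from_one, List.tail_cons,
      foldA_eq_loopA, diffsOf_eq_zip]
    match hr : diffsOf c0 rest with
    | [] => simp [loopA, PySem.List.max?]
    | x :: t =>
      rw [loopA_char, PySem.List.max?_id_cons]
      simp only [Option.getD_some]
      by_cases h : 0 < t.foldl max x
      · rw [if_pos h, if_pos h]; omega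
      · rw [if_neg h, if_neg h]
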